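-- pv_equiv track=rewrite | github.com/CarlosFlo123/CS450_HMW2 | CS450_HMW2.py | bnc_bck_frth
-- ===== SOURCE A (Python) =====
-- def scanDigits(x):
--   while (x > 1):
--     if (x%10 == 7):
--       return True
--     x = int(x/10)
--   return False
--
-- def bnc_bck_frth(k):
--   index = 0
--   goBack = 1
--   i = 0
--   while(index != k):
--     index = index + 1
--     if (goBack == 1):
--       i = i + 1
--     else:
--       i = i - 1
--     if (index % 7 == 0 or scanDigits(index)):
--       goBack = goBack * (-1)
--   return i
-- ===== SOURCE B (Python) =====
-- def has_seven(n):
--     while n > 0: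
--         if n % 10 == 7:
--             return True
--         n //= 10
--     return False
--
-- def bnc_bck_frth(k):
--     flips = [j for j in range(1, k + 1) if j % 7 == 0 or has_seven(j)]
--     pos, sign, prev = 0, 1, 0
--     for f in flips:
--         pos += sign * (f - prev)
--         sign = -sign
--         prev = f
--     return pos + sign * (k - prev)
-- ===== Notes on version B (the rewrite author's own statement) =====
-- stated objective: alternative
-- what changed: Replaces the per-step walk-and-flip simulation with a two-phase computation: collect the flip indices (multiples of seven or containing the digit seven) in one pass, then compute the final position as a signed sum of segment lengths between consecutive flips.
import Mathlib
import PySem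

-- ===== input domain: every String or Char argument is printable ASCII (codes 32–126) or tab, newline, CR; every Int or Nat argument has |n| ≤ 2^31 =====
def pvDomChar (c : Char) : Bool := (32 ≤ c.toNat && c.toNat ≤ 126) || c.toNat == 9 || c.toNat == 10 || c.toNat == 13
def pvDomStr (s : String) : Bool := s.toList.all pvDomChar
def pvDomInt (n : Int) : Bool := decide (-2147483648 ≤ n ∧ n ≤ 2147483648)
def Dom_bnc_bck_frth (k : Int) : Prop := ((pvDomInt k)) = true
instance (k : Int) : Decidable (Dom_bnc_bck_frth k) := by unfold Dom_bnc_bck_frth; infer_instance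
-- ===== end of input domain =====

-- B replaces A's per-step walk-and-flip simulation by collecting the flip indices and
-- summing signed segment lengths between consecutive flips (alternative decomposition, same cost).

-- ===== PORT A =====
-- scanDigits: 'int(x/10)' truncates toward zero; for the x > 1 reached by this loop it
-- equals floor division, ported exactly as PySem.Int.floordiv x 10.
def scanDigits (x : Int) : Bool :=
  if _h : 1 < x then
    if PySem.Int.mod x 10 = 7 then true
    else scanDigits (PySem.Int.floordiv x 10)
  else false
termination_by x.toNat
decreasing_by
  rw [PySem.Int.floordiv_eq_ediv_of_pos (by omega : (0:Int) < 10)]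
  omega

-- the while loop of bnc_bck_frth; fuel = number of remaining iterations ((k - index).toNat),
-- which exactly suffices when 0 ≤ k (index counts up from 0); for k < 0 the Python loop
-- never terminates — those inputs are excluded by Pre_.
def loopA : Nat → Int → Int → Int → Int → Int
  | 0, _, _, _, i => i
  | fuel+1, k, index, goBack, i =>
    if index = k then i
    else
      let index' := index + 1
      let i' := if goBack = 1 then i + 1 else i - 1
      let goBack' := if (PySem.Int.mod index' 7 == 0) || scanDigits index' then goBack * (-1) else goBack
      loopA fuel k index' goBack' i'

def bnc_bck_frth (k : Int) : Int := loopA (k - 0).toNat k 0 1 0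

-- ===== PORT B =====
def hasSeven (n : Int) : Bool :=
  if _h : 0 < n then
    if PySem.Int.mod n 10 = 7 then true
    else hasSeven (PySem.Int.floordiv n 10)
  else false
termination_by n.toNat
decreasing_by
  rw [PySem.Int.floordiv_eq_ediv_of_pos (by omega : (0:Int) < 10)]
  omega

-- one segment: state (pos, sign, prev), add sign * (f - prev), flip the sign, remember f
def segStep (st : Int × Int × Int) (f : Int) : Int × Int × Int :=
  (st.1 + st.2.1 * (f - st.2.2), -st.2.1, f)

def bnc_bck_frth_alt (k : Int) : Int :=
  let flips := (PySem.List.pyRange 1 (k+1) 1).filter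
    (fun j => (PySem.Int.mod j 7 == 0) || hasSeven j)
  let st := flips.foldl segStep (0, 1, 0)
  st.1 + st.2.1 * (k - st.2.2)

-- ===== PRECONDITION & SPEC =====
-- A's while loop counts index upward and stops only when index reaches k, so for negative k
-- it never terminates; Pre_ keeps exactly the inputs on which A returns.
def Pre_bnc_bck_frth (k : Int) : Prop := 0 ≤ k
instance (k : Int) : Decidable (Pre_bnc_bck_frth k) := by unfold Pre_bnc_bck_frth; infer_instance
def pvWitness_bnc_bck_frth : Int := 10

def Spec_bnc_bck_frth (k : Int) (out : Int) : Prop := out = bnc_bck_frth_alt k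
instance (k : Int) (out : Int) : Decidable (Spec_bnc_bck_frth k out) := by unfold Spec_bnc_bck_frth; infer_instance

-- ===== CLAIM (what is proved, stated in full; the proofs are below) =====
def Claim_equal_bnc_bck_frth : Prop := ∀ (k : Int), Dom_bnc_bck_frth k → Pre_bnc_bck_frth k → Spec_bnc_bck_frth k (bnc_bck_frth k)

-- ===== LEMMAS AND PROOFS =====

-- the two digit scanners agree on every input (both only differ at x = 1, where both give false)
theorem scan_eq_has (x : Int) : scanDigits x = hasSeven x := by
  by_cases h1 : 1 < x
  · rw [scanDigits, hasSeven]
    simp only [h1, dif_pos, dif_pos (by omega : 0 < x)]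
    split_ifs with h2
    · rfl
    · exact scan_eq_has (PySem.Int.floordiv x 10)
  · rw [scanDigits, hasSeven]
    simp only [h1, dif_neg, not_false_iff]
    by_cases h0 : 0 < x
    · -- x = 1
      have hx : x = 1 := by omega
      subst hx
      simp only [dif_pos (by omega : (0:Int) < 1)]
      rw [if_neg (by decide), hasSeven]
      simp
    · simp [h0]
termination_by x.toNat
decreasing_by
  rw [PySem.Int.floordiv_eq_ediv_of_pos (by omega : (0:Int) < 10)]
  omega

-- B's flip predicate
def flipB (j : Int) : Bool := (PySem.Int.mod j 7 == 0) || hasSeven j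

-- reference step of A's loop body, as a fold step over the visited index
def stepA (st : Int × Int) (j : Int) : Int × Int :=
  ((if st.2 = 1 then st.1 + 1 else st.1 - 1), if flipB j then st.2 * (-1) else st.2)

theorem loopA_eq_foldl (n : Nat) (index goBack i : Int) :
    loopA n (index + n) index goBack i =
      ((PySem.List.pyRange (index + 1) (index + n + 1) 1).foldl stepA (i, goBack)).1 := by
  induction n generalizing index goBack i with
  | zero =>
    simp [loopA]
  | succ m ih =>
    rw [loopA]
    rw [if_neg (by push_cast; omega)]
    rw [PySem.List.pyRange_one_cons (by push_cast; omega : index + 1 < index + (↑(m+1):Int) + 1)]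
    simp only [List.foldl_cons]
    have := ih (index + 1)
      (if flipB (index + 1) then goBack * (-1) else goBack)
      (if goBack = 1 then i + 1 else i - 1)
    have harg : index + 1 + (m:Int) = index + (↑(m+1):Int) := by push_cast; ring
    rw [harg] at this
    rw [scan_eq_has (index + 1)]
    simp only [flipB] at this
    simp only [stepA, flipB]
    exact this

-- the segment fold tracks A's fold: same sign, and pos + sign * (n - prev) is A's position
theorem seg_invariant (n : Nat) :
    let W := (PySem.List.pyRange 1 ((n:Int) + 1) 1).foldl stepA (0, 1)
    let S := ((PySem.List.pyRange 1 ((n:Int) + 1) 1).filter flipB).foldl segStep (0, 1, 0)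
    S.2.1 = W.2 ∧ S.1 + S.2.1 * ((n:Int) - S.2.2) = W.1 ∧ (W.2 = 1 ∨ W.2 = -1) := by
  induction n with
  | zero =>
    simp
  | succ m ih =>
    have hsplit : PySem.List.pyRange 1 ((↑(m+1):Int) + 1) 1 =
        PySem.List.pyRange 1 ((m:Int) + 1) 1 ++ [(m:Int) + 1] := by
      have h := PySem.List.pyRange_one_succ_right (a := 1) (b := (m:Int) + 1) (by omega)
      push_cast
      exact h
    intro W S
    simp only [W, S, hsplit, List.filter_append, List.foldl_append]
    obtain ⟨hsign, hpos, hone⟩ := ih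
    set W0 := (PySem.List.pyRange 1 ((m:Int) + 1) 1).foldl stepA (0, 1) with hW0
    set S0 := ((PySem.List.pyRange 1 ((m:Int) + 1) 1).filter flipB).foldl segStep (0, 1, 0) with hS0
    by_cases hf : flipB ((m:Int) + 1)
    · simp only [List.filter_cons, hf, List.filter_nil, List.foldl_cons, List.foldl_nil,
        stepA, if_pos, segStep]
      push_cast
      refine ⟨by omega, ?_, by omega⟩
      rcases hone with h | h
      · have hp := hpos; rw [hsign, h] at hp
        rw [if_pos h, hsign, h]
        ring_nf; ring_nf at hp; omega
      · have hp := hpos; rw [hsign, h] at hp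
        rw [if_neg (by rw [h]; decide), hsign, h]
        ring_nf; ring_nf at hp; omega
    · simp only [List.filter_cons, hf, List.filter_nil, List.foldl_cons, List.foldl_nil,
        stepA, if_neg, Bool.false_eq_true, not_false_iff]
      push_cast
      refine ⟨hsign, ?_, hone⟩
      rcases hone with h | h
      · have hp := hpos; rw [hsign, h] at hp
        rw [if_pos h, hsign, h]
        ring_nf; ring_nf at hp; omega
      · have hp := hpos; rw [hsign, h] at hp
        rw [if_neg (by rw [h]; decide), hsign, h]
        ring_nf; ring_nf at hp; omega

-- ===== VERDICT (by name: the statement is the Claim_ definition above) =====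
theorem bnc_bck_frth_spec : Claim_equal_bnc_bck_frth := by
  intro k _hdom hk
  unfold Pre_bnc_bck_frth at hk
  unfold Spec_bnc_bck_frth bnc_bck_frth bnc_bck_frth_alt
  obtain ⟨n, rfl⟩ : ∃ n : Nat, k = (n : Int) := ⟨k.toNat, by omega⟩
  have hA := loopA_eq_foldl n 0 1 0
  simp only [zero_add] at hA
  have hfuel : ((n:Int) - 0).toNat = n := by omega
  rw [hfuel, hA]
  rw [show (fun j => (PySem.Int.mod j 7 == 0) || hasSeven j) = flipB from rfl]
  obtain ⟨hsign, hpos, _⟩ := seg_invariant n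
  exact hpos.symm
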